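-- pv_equiv track=rewrite | github.com/SourceMation/images | containers/docker-build-order.py | print_forest_as_tree
-- ===== SOURCE A (Python) =====
-- from collections import defaultdict, deque
-- from typing import Dict, List, Optional, Set, Tuple
--
-- def print_forest_as_tree(local_images: Set[str], deps_local: Dict[str, Set[str]]) -> str:
--     # Build edges dep -> dependent
--     children = defaultdict(set)
--     parents = defaultdict(set)
--     for img in local_images:
--         for dep in deps_local.get(img, set()):
--             if dep in local_images:
--                 children[dep].add(img)
--                 parents[img].add(dep)
--
--     roots = [img for img in sorted(local_images) if not parents.get(img)]
--     # Note: images involved in a cycle all have parents (each other), so they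
--     # won't appear in roots. They are already flagged in the WARNING header
--     # that main() prepends to the tree output.
--
--     lines: List[str] = []
--     seen_global: Set[str] = set()
--
--     def dfs(node: str, prefix: str, is_last: bool):
--         connector = "└── " if is_last else "├── "
--         label = node
--         if node in seen_global:
--             label += " (shared)"
--         else:
--             seen_global.add(node)
--
--         lines.append(prefix + connector + label)
--
--         kids = sorted(children.get(node, set()))
--         for i, k in enumerate(kids):
--             last = i == (len(kids) - 1)
--             new_prefix = prefix + ("    " if is_last else "│   ")
--             dfs(k, new_prefix, last)
--
--     for r_i, r in enumerate(roots):
--         label = r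
--         if r in seen_global:
--             label += " (shared)"
--         else:
--             seen_global.add(r)
--
--         lines.append(label)
--         kids = sorted(children.get(r, set()))
--         for i, k in enumerate(kids):
--             dfs(k, "", i == (len(kids) - 1))
--         if r_i != len(roots) - 1:
--             lines.append("")
--
--     return "\n".join(lines) + "\n"
-- ===== SOURCE B (Python) =====
-- def print_forest_as_tree(local_images, deps_local):
--     # Phase 0: child lists, sorted once per node; roots straight from deps_local.
--     children = {}
--     for img in local_images:
--         for dep in deps_local.get(img, ()):
--             if dep in local_images:
--                 children.setdefault(dep, set()).add(img)
--     kids_of = {d: sorted(s) for d, s in children.items()}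
--
--     def walk(node, prefix, is_last):
--         conn = "└── " if is_last else "├── "
--         items = [(prefix + conn, node)]
--         ks = kids_of.get(node, [])
--         np = prefix + ("    " if is_last else "│   ")
--         for i, k in enumerate(ks):
--             items += walk(k, np, i == len(ks) - 1)
--         return items
--
--     # Phase 1: pre-order items (text prefix, node); None marks a blank separator.
--     roots = [img for img in sorted(local_images)
--              if not any(d in local_images for d in deps_local.get(img, ()))]
--     items = []
--     for r_i, r in enumerate(roots):
--         items.append(("", r))
--         ks = kids_of.get(r, [])
--         for i, k in enumerate(ks):
--             items += walk(k, "", i == len(ks) - 1)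
--         if r_i != len(roots) - 1:
--             items.append(None)
--
--     # Phase 2: one linear pass adds the "(shared)" marks.
--     seen = set()
--     lines = []
--     for item in items:
--         if item is None:
--             lines.append("")
--         else:
--             pfx, node = item
--             lines.append(pfx + node + (" (shared)" if node in seen else ""))
--             seen.add(node)
--     return "\n".join(lines) + "\n"
-- ===== Notes on version B (the rewrite author's own statement) =====
-- stated objective: alternative
-- what changed: B replaces A's single seen-set-threading recursive DFS by three phases: it sorts each child list once and computes roots directly from deps_local (no parents map), builds a pure pre-order item list (prefix, node) per root, and then one linear pass over that list appends the '(shared)' marks and blank separators.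
import Mathlib
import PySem

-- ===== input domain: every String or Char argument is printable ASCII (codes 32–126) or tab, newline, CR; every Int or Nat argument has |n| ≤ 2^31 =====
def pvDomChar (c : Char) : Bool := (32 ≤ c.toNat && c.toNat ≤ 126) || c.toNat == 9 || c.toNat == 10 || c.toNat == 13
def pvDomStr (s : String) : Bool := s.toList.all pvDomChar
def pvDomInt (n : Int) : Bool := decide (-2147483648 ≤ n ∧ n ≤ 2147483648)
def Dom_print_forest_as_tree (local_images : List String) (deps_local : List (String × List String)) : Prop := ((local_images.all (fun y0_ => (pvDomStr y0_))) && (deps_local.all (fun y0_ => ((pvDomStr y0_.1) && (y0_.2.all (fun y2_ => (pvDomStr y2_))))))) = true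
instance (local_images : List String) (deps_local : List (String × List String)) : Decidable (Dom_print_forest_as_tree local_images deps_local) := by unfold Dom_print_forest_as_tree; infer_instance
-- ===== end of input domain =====

-- B re-implements A as three phases (child lists sorted once + roots straight from deps; a pure
-- pre-order item list per root; one linear pass adding the "(shared)" marks); same return value.

-- ===== PORT A =====
-- state threaded by A's dfs: (seen_global, lines)
def pvBuildA (local_images : List String) (deps_local : List (String × List String)) :
    PySem.Dict String (List String) × PySem.Dict String (List String) :=
  local_images.foldl (fun cp img =>
    ((PySem.Dict.mk deps_local).getD img []).foldl (fun cp dep =>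
      if local_images.contains dep then
        (cp.1.modify dep [] (fun s => PySem.Set.add s img),
         cp.2.modify img [] (fun s => PySem.Set.add s dep))
      else cp) cp)
    (PySem.Dict.empty, PySem.Dict.empty)

def pvDfsA (children : PySem.Dict String (List String)) :
    Nat → String → String → Bool → List String × List String → List String × List String
  | 0, _, _, _, st => st
  | fuel+1, node, pfx, is_last, st =>
    let connector := if is_last then "└── " else "├── "
    let (label, seen) := if st.1.contains node then (node ++ " (shared)", st.1)
                         else (node, PySem.Set.add st.1 node)
    let lines := st.2 ++ [pfx ++ connector ++ label]
    let kids := PySem.List.sorted (children.getD node []) (fun x => x) false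
    (PySem.List.enumerate kids).foldl (fun st ik =>
      let new_prefix := pfx ++ (if is_last then "    " else "│   ")
      pvDfsA children fuel ik.2 new_prefix (ik.1 == (kids.length : Int) - 1) st) (seen, lines)

def print_forest_as_tree (local_images : List String) (deps_local : List (String × List String)) : String :=
  let cp := pvBuildA local_images deps_local
  let roots := (PySem.List.sorted local_images (fun x => x) false).filter (fun img =>
    match cp.2.get? img with
    | none => true
    | some s => s.isEmpty)
  let st := (PySem.List.enumerate roots).foldl (fun (st : List String × List String) ri =>
    let (label, seen) := if st.1.contains ri.2 then (ri.2 ++ " (shared)", st.1)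
                         else (ri.2, PySem.Set.add st.1 ri.2)
    let lines := st.2 ++ [label]
    let kids := PySem.List.sorted (cp.1.getD ri.2 []) (fun x => x) false
    let st := (PySem.List.enumerate kids).foldl (fun st ik =>
      pvDfsA cp.1 local_images.length ik.2 "" (ik.1 == (kids.length : Int) - 1) st) (seen, lines)
    if ri.1 != (roots.length : Int) - 1 then (st.1, st.2 ++ [""]) else st) ([], [])
  PySem.Str.join "\n" st.2 ++ "\n"

-- ===== PORT B =====
def pvChildrenB (local_images : List String) (deps_local : List (String × List String)) :
    PySem.Dict String (List String) :=
  local_images.foldl (fun ch img =>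
    ((PySem.Dict.mk deps_local).getD img []).foldl (fun ch dep =>
      if local_images.contains dep then ch.modify dep [] (fun s => PySem.Set.add s img) else ch) ch)
    PySem.Dict.empty

def pvKidsOfB (ch : PySem.Dict String (List String)) : PySem.Dict String (List String) :=
  PySem.Dict.mk (ch.items.map (fun p => (p.1, PySem.List.sorted p.2 (fun x => x) false)))

def pvWalkB (kidsOf : PySem.Dict String (List String)) :
    Nat → String → String → Bool → List (String × String)
  | 0, _, _, _ => []
  | fuel+1, node, pfx, is_last =>
    let conn := if is_last then "└── " else "├── "
    let ks := kidsOf.getD node []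
    let np := pfx ++ (if is_last then "    " else "│   ")
    (pfx ++ conn, node) ::
      (PySem.List.enumerate ks).flatMap (fun ik =>
        pvWalkB kidsOf fuel ik.2 np (ik.1 == (ks.length : Int) - 1))

def pvItemsB (kidsOf : PySem.Dict String (List String)) (roots : List String) (fuel : Nat) :
    List (Option (String × String)) :=
  (PySem.List.enumerate roots).foldl (fun items ri =>
    let items := items ++ [some ("", ri.2)]
    let ks := kidsOf.getD ri.2 []
    let items := items ++ ((PySem.List.enumerate ks).flatMap (fun ik =>
      pvWalkB kidsOf fuel ik.2 "" (ik.1 == (ks.length : Int) - 1))).map some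
    if ri.1 != (roots.length : Int) - 1 then items ++ [none] else items) []

def pvMarkB (items : List (Option (String × String))) (st : List String × List String) :
    List String × List String :=
  items.foldl (fun (st : List String × List String) item =>
    match item with
    | none => (st.1, st.2 ++ [""])
    | some pn =>
      (PySem.Set.add st.1 pn.2,
       st.2 ++ [pn.1 ++ pn.2 ++ (if st.1.contains pn.2 then " (shared)" else "")])) st

def print_forest_as_tree_alt (local_images : List String) (deps_local : List (String × List String)) : String :=
  let ch := pvChildrenB local_images deps_local
  let kidsOf := pvKidsOfB ch
  let roots := (PySem.List.sorted local_images (fun x => x) false).filter (fun img =>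
    (((PySem.Dict.mk deps_local).getD img []).filter (fun d => local_images.contains d)).isEmpty)
  let items := pvItemsB kidsOf roots local_images.length
  PySem.Str.join "\n" (pvMarkB items ([], [])).2 ++ "\n"

-- ===== PRECONDITION & SPEC =====
-- Pre_ helpers: the dep→dependent edge relation restricted to local_images, its roots, and
-- bounded reachability (length-many dedup'd expansion steps reach every node a path can).
def pvChildF (local_images : List String) (deps_local : List (String × List String)) (v : String) : List String :=
  local_images.filter (fun img => ((PySem.Dict.mk deps_local).getD img []).contains v)

def pvRootsP (local_images : List String) (deps_local : List (String × List String)) : List String :=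
  local_images.filter (fun img =>
    (((PySem.Dict.mk deps_local).getD img []).filter (fun d => local_images.contains d)).isEmpty)

def pvExpand (local_images : List String) (deps_local : List (String × List String)) (S : List String) : List String :=
  (S ++ S.flatMap (pvChildF local_images deps_local)).dedup

-- Pre_ excludes exactly the inputs on which A never returns: a dependency cycle reachable from a
-- root makes A's recursive dfs call itself forever (Python RecursionError).
def Pre_print_forest_as_tree (local_images : List String) (deps_local : List (String × List String)) : Prop :=
  ∀ v ∈ (pvExpand local_images deps_local)^[local_images.length] (pvRootsP local_images deps_local),
    v ∉ (pvExpand local_images deps_local)^[local_images.length] (pvChildF local_images deps_local v)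

instance (local_images : List String) (deps_local : List (String × List String)) :
    Decidable (Pre_print_forest_as_tree local_images deps_local) := by
  unfold Pre_print_forest_as_tree; infer_instance

def pvWitness_print_forest_as_tree : List String × (List (String × List String)) :=
  (["a", "b", "c"], [("b", ["a"]), ("c", ["a", "b"])])

def Spec_print_forest_as_tree (local_images : List String) (deps_local : List (String × List String)) (out : String) : Prop := out = print_forest_as_tree_alt local_images deps_local
instance (local_images : List String) (deps_local : List (String × List String)) (out : String) : Decidable (Spec_print_forest_as_tree local_images deps_local out) := by unfold Spec_print_forest_as_tree; infer_instance

-- ===== CLAIM (what is proved, stated in full; the proofs are below) =====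
def Claim_equal_print_forest_as_tree : Prop := ∀ (local_images : List String) (deps_local : List (String × List String)), Dom_print_forest_as_tree local_images deps_local → Pre_print_forest_as_tree local_images deps_local → Spec_print_forest_as_tree local_images deps_local (print_forest_as_tree local_images deps_local)


-- ===== LEMMAS AND PROOFS =====

-- parents-side fold, in isolation (proof helper)
def pvStepP (local_images : List String) (deps_local : List (String × List String))
    (d : PySem.Dict String (List String)) (img : String) : PySem.Dict String (List String) :=
  ((PySem.Dict.mk deps_local).getD img []).foldl
    (fun d dep => if local_images.contains dep then d.modify img [] (fun s => PySem.Set.add s dep) else d) d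

def pvParents (local_images : List String) (deps_local : List (String × List String)) :
    PySem.Dict String (List String) :=
  local_images.foldl (pvStepP local_images deps_local) PySem.Dict.empty

-- "not parents.get(img)": the entry is missing or empty
def pvPempty (d : PySem.Dict String (List String)) (x : String) : Bool :=
  !d.contains x || (d.getD x []).isEmpty

lemma pvSet_add_isEmpty (s : PySem.Set String) (a : String) :
    (PySem.Set.add s a).isEmpty = false := by
  unfold PySem.Set.add
  split
  · rename_i h
    cases s with
    | nil => simp [PySem.Set.contains] at h
    | cons b t => simp
  · simp

lemma pvBuild_inner_pair (local_images : List String) (img : String) :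
    ∀ (ds : List String) (c p : PySem.Dict String (List String)),
      ds.foldl (fun cp dep =>
        if local_images.contains dep then
          (cp.1.modify dep [] (fun s => PySem.Set.add s img),
           cp.2.modify img [] (fun s => PySem.Set.add s dep))
        else cp) (c, p)
      = (ds.foldl (fun ch dep =>
            if local_images.contains dep then ch.modify dep [] (fun s => PySem.Set.add s img) else ch) c,
         ds.foldl (fun d dep =>
            if local_images.contains dep then d.modify img [] (fun s => PySem.Set.add s dep) else d) p) := by
  intro ds
  induction ds with
  | nil => intro c p; simp
  | cons dep ds ih =>
    intro c p
    simp only [List.foldl_cons]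
    split_ifs with h <;> exact ih _ _

lemma pvBuildA_aux (local_images : List String) (deps_local : List (String × List String)) :
    ∀ (li' : List String) (c p : PySem.Dict String (List String)),
      li'.foldl (fun cp img =>
        ((PySem.Dict.mk deps_local).getD img []).foldl (fun cp dep =>
          if local_images.contains dep then
            (cp.1.modify dep [] (fun s => PySem.Set.add s img),
             cp.2.modify img [] (fun s => PySem.Set.add s dep))
          else cp) cp) (c, p)
      = (li'.foldl (fun ch img =>
           ((PySem.Dict.mk deps_local).getD img []).foldl (fun ch dep =>
             if local_images.contains dep then ch.modify dep [] (fun s => PySem.Set.add s img) else ch) ch) c,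
         li'.foldl (pvStepP local_images deps_local) p) := by
  intro li'
  induction li' with
  | nil => intro c p; simp
  | cons img li' ih =>
    intro c p
    simp only [List.foldl_cons, pvStepP]
    rw [pvBuild_inner_pair]
    exact ih _ _

lemma pvBuildA_eq (local_images : List String) (deps_local : List (String × List String)) :
    pvBuildA local_images deps_local
      = (pvChildrenB local_images deps_local, pvParents local_images deps_local) := by
  unfold pvBuildA pvChildrenB pvParents
  exact pvBuildA_aux local_images deps_local local_images _ _

-- parents emptiness through the inner fold over one image's deps
lemma pvPempty_inner (local_images : List String) (img x : String) :
    ∀ (ds : List String) (d : PySem.Dict String (List String)),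
      pvPempty (ds.foldl (fun d dep =>
          if local_images.contains dep then d.modify img [] (fun s => PySem.Set.add s dep) else d) d) x
      = (pvPempty d x && (x != img || (ds.filter (fun dd => local_images.contains dd)).isEmpty)) := by
  intro ds
  induction ds with
  | nil => intro d; simp
  | cons dep ds ih =>
    intro d
    simp only [List.foldl_cons]
    by_cases h : local_images.contains dep = true
    · rw [if_pos h, ih, List.filter_cons_of_pos h]
      by_cases hx : x = img
      · subst hx
        have h1 : pvPempty (d.modify x [] (fun s => PySem.Set.add s dep)) x = false := by
          simp [pvPempty, PySem.Dict.contains_modify, pvSet_add_isEmpty]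
        rw [h1]
        simp
      · have hbe : (x == img) = false := by simp [hx]
        have h1 : pvPempty (d.modify img [] (fun s => PySem.Set.add s dep)) x = pvPempty d x := by
          simp [pvPempty, PySem.Dict.contains_modify, PySem.Dict.getD_modify, hx, hbe]
        have hb : (x != img) = true := by simp [bne, hbe]
        rw [h1, hb]
        simp
    · rw [if_neg h, ih, List.filter_cons_of_neg (by simpa using h)]

lemma pvPempty_outer (local_images : List String) (deps_local : List (String × List String)) (x : String) :
    ∀ (li' : List String) (d : PySem.Dict String (List String)),
      pvPempty (li'.foldl (pvStepP local_images deps_local) d) x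
      = (pvPempty d x
         && !(li'.contains x
              && !(((PySem.Dict.mk deps_local).getD x []).filter (fun dd => local_images.contains dd)).isEmpty)) := by
  intro li'
  induction li' with
  | nil => intro d; simp
  | cons img li' ih =>
    intro d
    simp only [List.foldl_cons]
    rw [ih]
    conv_lhs => rw [pvStepP, pvPempty_inner]
    by_cases hx : x = img
    · subst hx
      have hb : (x != x) = false := by simp
      have hc : (x :: li').contains x = true := by simp
      rw [hb, hc]
      cases hE : (((PySem.Dict.mk deps_local).getD x []).filter (fun dd => local_images.contains dd)).isEmpty <;>
        simp [hE]
    · have hbe : (x == img) = false := by simp [hx]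
      have hb : (x != img) = true := by simp [bne, hbe]
      have hc : ((img :: li').contains x) = (li'.contains x) := by
        simp only [List.contains_cons, hbe, Bool.false_or]
      rw [hb, hc]
      simp

lemma pvPempty_match (d : PySem.Dict String (List String)) (x : String) :
    (match d.get? x with | none => true | some s => s.isEmpty) = pvPempty d x := by
  rw [pvPempty, PySem.Dict.contains_eq_isSome_get?, PySem.Dict.getD_eq_get?_getD]
  cases h : d.get? x <;> simp

lemma pvRoots_eq (local_images : List String) (deps_local : List (String × List String)) :
    ((PySem.List.sorted local_images (fun x => x) false).filter (fun img =>
        match (pvBuildA local_images deps_local).2.get? img with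
        | none => true
        | some s => s.isEmpty))
    = ((PySem.List.sorted local_images (fun x => x) false).filter (fun img =>
        (((PySem.Dict.mk deps_local).getD img []).filter (fun d => local_images.contains d)).isEmpty)) := by
  apply List.filter_congr
  intro x hx
  have hmem : x ∈ local_images := (PySem.List.mem_sorted _ _ _ _).1 hx
  have hcont : local_images.contains x = true := by simpa using hmem
  rw [pvPempty_match, pvBuildA_eq, pvParents, pvPempty_outer]
  have he : pvPempty PySem.Dict.empty x = true := by
    simp [pvPempty, PySem.Dict.getD_eq_get?_getD, PySem.Dict.get?_empty,
          PySem.Dict.contains_eq_isSome_get?]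
  rw [he, hcont]
  cases hE : (((PySem.Dict.mk deps_local).getD x []).filter (fun dd => local_images.contains dd)).isEmpty <;>
    simp [hE]

lemma pvKids_get? (x : String) :
    ∀ (items : List (String × List String)),
      (PySem.Dict.mk (items.map (fun p => (p.1, PySem.List.sorted p.2 (fun x => x) false)))).get? x
      = Option.map (fun v => PySem.List.sorted v (fun x => x) false) ((PySem.Dict.mk items).get? x) := by
  intro items
  induction items with
  | nil => simp [PySem.Dict.get?]
  | cons p items ih =>
    obtain ⟨k, v⟩ := p
    simp only [List.map_cons, PySem.Dict.get?_mk_cons]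
    by_cases h : (k == x) = true <;> simp [h, ih]

lemma pvKidsOf_getD (ch : PySem.Dict String (List String)) (n : String) :
    (pvKidsOfB ch).getD n [] = PySem.List.sorted (ch.getD n []) (fun x => x) false := by
  rw [pvKidsOfB, PySem.Dict.getD_eq_get?_getD, pvKids_get?]
  have : PySem.Dict.mk ch.items = ch := rfl
  rw [this, PySem.Dict.getD_eq_get?_getD]
  cases h : ch.get? n <;> simp [PySem.List.sorted_eq_nil_iff]

lemma pvMarkB_append (xs ys : List (Option (String × String))) (st : List String × List String) :
    pvMarkB (xs ++ ys) st = pvMarkB ys (pvMarkB xs st) := by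
  simp [pvMarkB, List.foldl_append]

lemma pvMarkB_cons_some (pn : String × String) (its : List (Option (String × String)))
    (st : List String × List String) :
    pvMarkB (some pn :: its) st
    = pvMarkB its (PySem.Set.add st.1 pn.2,
        st.2 ++ [pn.1 ++ pn.2 ++ (if st.1.contains pn.2 then " (shared)" else "")]) := rfl

lemma pvMarkB_cons_none (its : List (Option (String × String))) (st : List String × List String) :
    pvMarkB (none :: its) st = pvMarkB its (st.1, st.2 ++ [""]) := rfl

lemma pvDfs_eq (children kidsOf : PySem.Dict String (List String))
    (HK : ∀ n, kidsOf.getD n [] = PySem.List.sorted (children.getD n []) (fun x => x) false) :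
    ∀ (fuel : Nat) (node pfx : String) (last : Bool) (st : List String × List String),
      pvDfsA children fuel node pfx last st
      = pvMarkB ((pvWalkB kidsOf fuel node pfx last).map some) st := by
  intro fuel
  induction fuel with
  | zero => intro node pfx last st; rfl
  | succ fuel ih =>
    have K2 : ∀ (l : List (Int × String)) (np : String) (L : Int) (st' : List String × List String),
        l.foldl (fun st ik => pvDfsA children fuel ik.2 np (ik.1 == L) st) st'
        = pvMarkB ((l.flatMap (fun ik => pvWalkB kidsOf fuel ik.2 np (ik.1 == L))).map some) st' := by
      intro l np L
      induction l with
      | nil => intro st'; rfl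
      | cons ik l ihl =>
        intro st'
        simp only [List.foldl_cons, List.flatMap_cons, List.map_append, pvMarkB_append]
        rw [ih, ihl]
    intro node pfx last st
    simp only [pvDfsA, pvWalkB, List.map_cons, pvMarkB_cons_some, HK]
    rw [K2]
    cases hc : st.1.contains node <;>
      simp only [hc, Bool.false_eq_true, ↓reduceIte, PySem.Set.add, PySem.Set.contains, hc,
        String.append_assoc, String.append_empty]

lemma pvDfsFold_eq (children kidsOf : PySem.Dict String (List String))
    (HK : ∀ n, kidsOf.getD n [] = PySem.List.sorted (children.getD n []) (fun x => x) false)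
    (fuel : Nat) :
    ∀ (l : List (Int × String)) (np : String) (L : Int) (st : List String × List String),
      l.foldl (fun st ik => pvDfsA children fuel ik.2 np (ik.1 == L) st) st
      = pvMarkB ((l.flatMap (fun ik => pvWalkB kidsOf fuel ik.2 np (ik.1 == L))).map some) st := by
  intro l np L
  induction l with
  | nil => intro st; rfl
  | cons ik l ihl =>
    intro st
    simp only [List.foldl_cons, List.flatMap_cons, List.map_append, pvMarkB_append]
    rw [pvDfs_eq children kidsOf HK, ihl]

def pvGB (kidsOf : PySem.Dict String (List String)) (roots : List String) (fuel : Nat)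
    (ri : Int × String) : List (Option (String × String)) :=
  some ("", ri.2) ::
    (((PySem.List.enumerate (kidsOf.getD ri.2 [])).flatMap (fun ik =>
        pvWalkB kidsOf fuel ik.2 "" (ik.1 == ((kidsOf.getD ri.2 []).length : Int) - 1))).map some
     ++ (if ri.1 != (roots.length : Int) - 1 then [none] else []))

lemma pvItems_eq (kidsOf : PySem.Dict String (List String)) (roots : List String) (fuel : Nat) :
    pvItemsB kidsOf roots fuel
    = (PySem.List.enumerate roots).flatMap (pvGB kidsOf roots fuel) := by
  rw [pvItemsB]
  have aux : ∀ (l : List (Int × String)) (acc : List (Option (String × String))),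
      l.foldl (fun items ri =>
        let items := items ++ [some ("", ri.2)]
        let ks := kidsOf.getD ri.2 []
        let items := items ++ ((PySem.List.enumerate ks).flatMap (fun ik =>
          pvWalkB kidsOf fuel ik.2 "" (ik.1 == (ks.length : Int) - 1))).map some
        if ri.1 != (roots.length : Int) - 1 then items ++ [none] else items) acc
      = acc ++ l.flatMap (pvGB kidsOf roots fuel) := by
    intro l
    induction l with
    | nil => intro acc; simp
    | cons ri l ihl =>
      intro acc
      simp only [List.foldl_cons, List.flatMap_cons]
      rw [ihl]
      by_cases hb : (ri.1 != (roots.length : Int) - 1) = true <;>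
        simp [hb, pvGB, List.append_assoc]
  simpa using aux (PySem.List.enumerate roots) []

lemma pvRootLoop_eq (children kidsOf : PySem.Dict String (List String))
    (HK : ∀ n, kidsOf.getD n [] = PySem.List.sorted (children.getD n []) (fun x => x) false)
    (roots : List String) (fuel : Nat) :
    ∀ (l : List (Int × String)) (st : List String × List String),
      l.foldl (fun (st : List String × List String) ri =>
        let (label, seen) := if st.1.contains ri.2 then (ri.2 ++ " (shared)", st.1)
                             else (ri.2, PySem.Set.add st.1 ri.2)
        let lines := st.2 ++ [label]
        let kids := PySem.List.sorted (children.getD ri.2 []) (fun x => x) false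
        let st := (PySem.List.enumerate kids).foldl (fun st ik =>
          pvDfsA children fuel ik.2 "" (ik.1 == (kids.length : Int) - 1) st) (seen, lines)
        if ri.1 != (roots.length : Int) - 1 then (st.1, st.2 ++ [""]) else st) st
      = pvMarkB (l.flatMap (pvGB kidsOf roots fuel)) st := by
  intro l
  induction l with
  | nil => intro st; rfl
  | cons ri l ihl =>
    intro st
    simp only [List.foldl_cons, List.flatMap_cons, pvMarkB_append]
    rw [ihl]
    congr 1
    rw [pvGB, pvMarkB_cons_some, pvMarkB_append, pvDfsFold_eq children kidsOf HK, HK]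
    have hroot : (PySem.Set.add st.1 ri.2,
        st.2 ++ ["" ++ ri.2 ++ (if st.1.contains ri.2 then " (shared)" else "")])
        = (if st.1.contains ri.2 then (st.1, st.2 ++ [ri.2 ++ " (shared)"])
           else (st.1 ++ [ri.2], st.2 ++ [ri.2])) := by
      cases hc : st.1.contains ri.2 <;>
        simp [hc, PySem.Set.add, PySem.Set.contains, String.empty_append, String.append_empty] <;>
        simpa using hc
    rw [hroot]
    cases hc : st.1.contains ri.2 <;>
      cases hb : (ri.1 != (roots.length : Int) - 1) <;>
        simp only [hc, hb, Bool.false_eq_true, ↓reduceIte, pvMarkB_cons_none,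
          PySem.Set.add, PySem.Set.contains] <;> rfl

lemma pvMain_eq (local_images : List String) (deps_local : List (String × List String)) :
    print_forest_as_tree local_images deps_local
    = print_forest_as_tree_alt local_images deps_local := by
  rw [print_forest_as_tree, print_forest_as_tree_alt]
  simp only []
  rw [pvRoots_eq]
  have HK : ∀ n, (pvKidsOfB (pvChildrenB local_images deps_local)).getD n []
      = PySem.List.sorted ((pvChildrenB local_images deps_local).getD n []) (fun x => x) false :=
    fun n => pvKidsOf_getD _ n
  generalize hR : ((PySem.List.sorted local_images (fun x => x) false).filter (fun img =>
      (((PySem.Dict.mk deps_local).getD img []).filter (fun d => local_images.contains d)).isEmpty)) = R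
  rw [pvItems_eq, pvBuildA_eq]
  simp only []
  rw [pvRootLoop_eq (pvChildrenB local_images deps_local) (pvKidsOfB (pvChildrenB local_images deps_local)) HK R local_images.length]

-- ===== VERDICT (by name: the statement is the Claim_ definition above) =====
theorem print_forest_as_tree_spec : Claim_equal_print_forest_as_tree := by
  intro local_images deps_local _ _
  unfold Spec_print_forest_as_tree
  exact pvMain_eq local_images deps_local
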